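-- pv_equiv track=rewrite | github.com/themantalope/executor-image-paddlepaddle-ocr | text_group_helper.py | get_closest_group
-- ===== SOURCE A (Python) =====
-- def get_closest_group(point, groups, max_x_distance, max_y_distance):
--     closest_group = None
--     for k, group in groups.items():
--         for gp in group:
--             if abs(point[0] - gp[0]) < max_x_distance and abs(point[1] - gp[1]) < max_y_distance:
--                 closest_group = k
--                 break
--     return closest_group
-- ===== SOURCE B (Python) =====
-- def get_closest_group(point, groups, max_x_distance, max_y_distance):
--     for k, group in reversed(list(groups.items())):
--         if any(abs(point[0] - gp[0]) < max_x_distance and abs(point[1] - gp[1]) < max_y_distance for gp in group):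
--             return k
--     return None
-- ===== Notes on version B (the rewrite author's own statement) =====
-- stated objective: alternative
-- what changed: B scans the groups in reverse insertion order and returns the first group containing a nearby point immediately (any + early return), instead of A's full forward scan that keeps overwriting the last match.
import Mathlib
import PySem

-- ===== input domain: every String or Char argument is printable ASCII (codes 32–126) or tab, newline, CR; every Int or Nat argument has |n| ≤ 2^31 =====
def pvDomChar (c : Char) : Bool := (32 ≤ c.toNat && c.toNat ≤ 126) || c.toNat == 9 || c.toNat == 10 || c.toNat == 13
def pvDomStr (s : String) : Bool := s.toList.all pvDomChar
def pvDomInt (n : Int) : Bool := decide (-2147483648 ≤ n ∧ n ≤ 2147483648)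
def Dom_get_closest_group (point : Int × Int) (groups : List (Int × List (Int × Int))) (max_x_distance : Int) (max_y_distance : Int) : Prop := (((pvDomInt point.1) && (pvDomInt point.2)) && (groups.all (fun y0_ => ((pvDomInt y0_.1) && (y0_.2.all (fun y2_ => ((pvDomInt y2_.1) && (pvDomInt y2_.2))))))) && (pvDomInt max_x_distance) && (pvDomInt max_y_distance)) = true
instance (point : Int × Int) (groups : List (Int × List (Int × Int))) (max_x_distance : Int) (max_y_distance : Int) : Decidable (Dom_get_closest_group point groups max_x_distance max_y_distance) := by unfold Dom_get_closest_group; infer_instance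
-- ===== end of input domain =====

-- B scans the groups in reverse order and returns the first match (A scans forward keeping the last match); alternative decomposition, same result.


-- ===== PORT A =====
-- inner 'for gp in group: if … : closest_group = k; break'
def gcgInner (point : Int × Int) (max_x_distance : Int) (max_y_distance : Int)
    (acc : Option Int) (k : Int) : List (Int × Int) → Option Int
  | [] => acc
  | gp :: rest =>
      if decide (|point.1 - gp.1| < max_x_distance) && decide (|point.2 - gp.2| < max_y_distance) then
        some k
      else gcgInner point max_x_distance max_y_distance acc k rest

def get_closest_group (point : Int × Int) (groups : List (Int × List (Int × Int))) (max_x_distance : Int) (max_y_distance : Int) : Option Int :=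
  groups.foldl (fun closest_group kg =>
    gcgInner point max_x_distance max_y_distance closest_group kg.1 kg.2) none

-- ===== PORT B =====
def get_closest_group_alt (point : Int × Int) (groups : List (Int × List (Int × Int))) (max_x_distance : Int) (max_y_distance : Int) : Option Int :=
  (groups.reverse.find? (fun kg =>
    kg.2.any (fun gp =>
      decide (|point.1 - gp.1| < max_x_distance) && decide (|point.2 - gp.2| < max_y_distance)))).map
    Prod.fst

-- ===== PRECONDITION & SPEC =====
def Spec_get_closest_group (point : Int × Int) (groups : List (Int × List (Int × Int))) (max_x_distance : Int) (max_y_distance : Int) (out : Option Int) : Prop := out = get_closest_group_alt point groups max_x_distance max_y_distance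
instance (point : Int × Int) (groups : List (Int × List (Int × Int))) (max_x_distance : Int) (max_y_distance : Int) (out : Option Int) : Decidable (Spec_get_closest_group point groups max_x_distance max_y_distance out) := by unfold Spec_get_closest_group; infer_instance

-- ===== CLAIM (what is proved, stated in full; the proofs are below) =====
def Claim_equal_get_closest_group : Prop := ∀ (point : Int × Int) (groups : List (Int × List (Int × Int))) (max_x_distance : Int) (max_y_distance : Int), Dom_get_closest_group point groups max_x_distance max_y_distance → Spec_get_closest_group point groups max_x_distance max_y_distance (get_closest_group point groups max_x_distance max_y_distance)

-- ===== LEMMAS AND PROOFS =====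

-- the inner loop with break equals 'if any match then some k else acc'
theorem gcgInner_eq_any (point : Int × Int) (mx my : Int) (acc : Option Int) (k : Int)
    (g : List (Int × Int)) :
    gcgInner point mx my acc k g =
      (if g.any (fun gp => decide (|point.1 - gp.1| < mx) && decide (|point.2 - gp.2| < my)) then
        some k else acc) := by
  induction g with
  | nil => simp [gcgInner]
  | cons gp rest ih =>
      simp only [gcgInner, List.any_cons]
      by_cases h : (decide (|point.1 - gp.1| < mx) && decide (|point.2 - gp.2| < my)) = true
      · simp [h]
      · simp only [Bool.not_eq_true] at h
        simp only [h, Bool.false_eq_true, if_false, Bool.false_or, ih]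

-- last forward match = first reverse match, generalized over the accumulator
theorem gcg_foldl_eq_find (point : Int × Int) (mx my : Int)
    (l : List (Int × List (Int × Int))) (acc : Option Int) :
    l.foldl (fun closest_group kg => gcgInner point mx my closest_group kg.1 kg.2) acc =
      match l.reverse.find? (fun kg =>
          kg.2.any (fun gp =>
            decide (|point.1 - gp.1| < mx) && decide (|point.2 - gp.2| < my))) with
        | some kg => some kg.1
        | none => acc := by
  induction l generalizing acc with
  | nil => simp
  | cons kg t ih =>
      simp only [List.foldl_cons, List.reverse_cons]
      rw [ih, gcgInner_eq_any]
      cases hf : t.reverse.find? (fun kg =>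
          kg.2.any (fun gp =>
            decide (|point.1 - gp.1| < mx) && decide (|point.2 - gp.2| < my))) with
      | some v => simp [List.find?_append, hf]
      | none =>
          by_cases h : (kg.2.any (fun gp =>
              decide (|point.1 - gp.1| < mx) && decide (|point.2 - gp.2| < my))) = true <;>
            simp [List.find?_append, hf, List.find?, h]

-- ===== VERDICT (by name: the statement is the Claim_ definition above) =====
theorem get_closest_group_spec : Claim_equal_get_closest_group := by
  intro point groups mx my _
  unfold Spec_get_closest_group get_closest_group get_closest_group_alt
  rw [gcg_foldl_eq_find]
  cases hf : groups.reverse.find? (fun kg =>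
    kg.2.any (fun gp =>
      decide (|point.1 - gp.1| < mx) && decide (|point.2 - gp.2| < my))) <;> simp
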